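-- pv_equiv track=rewrite | github.com/NathanKe/AdventPython | 2023/17_answer.py | completed_straight_steps
-- ===== SOURCE A (Python) =====
-- def completed_straight_steps(i_path):
--     if len(i_path) == 2:
--         return 1
--     diffs = [i_path[i] - i_path[i - 1] for i in range(1, len(i_path))]
--     same_diff_count = 1
--     cur_diff_index = -1
--     while -1 * cur_diff_index < len(diffs):
--         if diffs[cur_diff_index] == diffs[cur_diff_index - 1]:
--             same_diff_count += 1
--             cur_diff_index -= 1
--         else:
--             break
--     return same_diff_count
-- ===== SOURCE B (Python) =====
-- def completed_straight_steps(i_path):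
--     if len(i_path) < 3:
--         return 1
--     diffs = [i_path[k] - i_path[k - 1] for k in range(1, len(i_path))]
--     run = 1
--     prev = diffs[0]
--     for d in diffs[1:]:
--         run = run + 1 if d == prev else 1
--         prev = d
--     return run
-- ===== Notes on version B (the rewrite author's own statement) =====
-- stated objective: alternative
-- what changed: Replaces A's backward while-loop with negative diffs indices and a break by a single forward fold over the difference list that resets its run counter on every change, keeping (run, prev) state.
import Mathlib
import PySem

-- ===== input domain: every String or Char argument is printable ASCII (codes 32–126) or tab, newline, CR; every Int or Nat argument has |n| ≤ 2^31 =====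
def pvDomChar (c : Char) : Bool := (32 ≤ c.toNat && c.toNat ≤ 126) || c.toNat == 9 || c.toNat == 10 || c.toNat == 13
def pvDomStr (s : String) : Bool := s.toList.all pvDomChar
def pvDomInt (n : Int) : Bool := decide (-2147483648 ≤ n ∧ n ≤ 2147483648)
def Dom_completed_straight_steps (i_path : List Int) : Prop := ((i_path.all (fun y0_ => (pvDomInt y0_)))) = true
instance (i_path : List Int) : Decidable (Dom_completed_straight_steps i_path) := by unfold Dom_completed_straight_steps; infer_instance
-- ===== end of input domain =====

-- B replaces A's backward negative-index scan with a forward (run, prev) fold over the diffs; alternative decomposition, same cost.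

-- ===== PORT A =====
-- the while loop: ci starts at -1 and decreases; fuel = diffs.length bounds the iterations (the
-- condition -ci < len fails after at most len-1 steps, so the fuel is never exhausted)
def csLoopA (diffs : List Int) (count ci : Int) : Nat → Int
  | 0 => count
  | fuel+1 =>
    if -1 * ci < (diffs.length : Int) then
      if PySem.List.pyGet? diffs ci = PySem.List.pyGet? diffs (ci - 1) then
        csLoopA diffs (count + 1) (ci - 1) fuel
      else count
    else count

def completed_straight_steps (i_path : List Int) : Int :=
  if (i_path.length : Int) = 2 then 1
  else
    -- i ranges over [1, len), so both indices are always in range: pyGetD is exact here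
    let diffs := (PySem.List.pyRange 1 (i_path.length) 1).map
      (fun i => PySem.List.pyGetD i_path i 0 - PySem.List.pyGetD i_path (i - 1) 0)
    csLoopA diffs 1 (-1) diffs.length

-- ===== PORT B =====
def csStep (s : Int × Int) (d : Int) : Int × Int :=
  (if d = s.2 then s.1 + 1 else 1, d)

def completed_straight_steps_alt (i_path : List Int) : Int :=
  if (i_path.length : Int) < 3 then 1
  else
    let diffs := (PySem.List.pyRange 1 (i_path.length) 1).map
      (fun i => PySem.List.pyGetD i_path i 0 - PySem.List.pyGetD i_path (i - 1) 0)
    ((PySem.List.slice diffs (some 1) none).foldl csStep (1, PySem.List.pyGetD diffs 0 0)).1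

-- ===== PRECONDITION & SPEC =====
def Spec_completed_straight_steps (i_path : List Int) (out : Int) : Prop := out = completed_straight_steps_alt i_path
instance (i_path : List Int) (out : Int) : Decidable (Spec_completed_straight_steps i_path out) := by unfold Spec_completed_straight_steps; infer_instance

-- ===== CLAIM (what is proved, stated in full; the proofs are below) =====
def Claim_equal_completed_straight_steps : Prop := ∀ (i_path : List Int), Dom_completed_straight_steps i_path → Spec_completed_straight_steps i_path (completed_straight_steps i_path)

-- ===== LEMMAS AND PROOFS =====

-- length of the leading run of equal elements (1 on lists of length ≤ 1)
def lead : List Int → Int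
  | [] => 1
  | [_] => 1
  | a :: b :: t => if a = b then lead (b :: t) + 1 else 1

theorem lead_short (l : List Int) (h : l.length ≤ 1) : lead l = 1 := by
  match l, h with
  | [], _ => rfl
  | [_], _ => rfl

theorem csLoopA_eq_lead (diffs : List Int) (fuel : Nat) :
    ∀ (j : Nat) (count : Int), diffs.length ≤ fuel + j + 1 →
    csLoopA diffs count (-((j : Int) + 1)) fuel = count + lead (diffs.reverse.drop j) - 1 := by
  induction fuel with
  | zero =>
    intro j count hf
    have : lead (diffs.reverse.drop j) = 1 := by
      apply lead_short; simp [List.length_drop]; omega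
    simp [csLoopA, this]
  | succ fuel ih =>
    intro j count hf
    by_cases hc : j + 1 < diffs.length
    · have h1 : (0:Nat) < j + 1 := by omega
      have h2 : j + 1 ≤ diffs.length := by omega
      have h3 : (0:Nat) < j + 2 := by omega
      have h4 : j + 2 ≤ diffs.length := by omega
      have e1 : PySem.List.pyGet? diffs (-((j : Int) + 1)) = diffs[diffs.length - (j+1)]? := by
        have := PySem.List.pyGet?_neg_natCast (xs := diffs) (k := j+1) (by omega) (by exact_mod_cast h2)
        simpa using this
      have e2 : PySem.List.pyGet? diffs (-((j : Int) + 1) - 1) = diffs[diffs.length - (j+2)]? := by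
        have := PySem.List.pyGet?_neg_natCast (xs := diffs) (k := j+2) (by omega) (by exact_mod_cast h4)
        have harg : (-((j : Int) + 1) - 1) = -(((j+2 : Nat) : Int)) := by push_cast; ring
        rw [harg]; simpa using this
      have hj : j < diffs.reverse.length := by simp; omega
      have hj1 : j + 1 < diffs.reverse.length := by simp; omega
      have r1 : diffs.reverse[j]? = diffs[diffs.length - (j+1)]? := by
        rw [List.getElem?_eq_getElem hj, List.getElem?_eq_getElem (by omega)]
        congr 1
        rw [List.getElem_reverse]
        congr 1
        omega
      have r2 : diffs.reverse[j+1]? = diffs[diffs.length - (j+2)]? := by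
        rw [List.getElem?_eq_getElem hj1, List.getElem?_eq_getElem (by omega)]
        congr 1
        rw [List.getElem_reverse]
        congr 1
        omega
      have hdrop : diffs.reverse.drop j = diffs.reverse[j] :: diffs.reverse.drop (j+1) :=
        List.drop_eq_getElem_cons hj
      have hdrop1 : diffs.reverse.drop (j+1) = diffs.reverse[j+1] :: diffs.reverse.drop (j+2) :=
        List.drop_eq_getElem_cons hj1
      have hcond : (-1 * (-((j : Int) + 1)) < (diffs.length : Int)) := by omega
      rw [csLoopA, if_pos hcond]
      by_cases heq : diffs.reverse[j] = diffs.reverse[j+1]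
      · have hget : PySem.List.pyGet? diffs (-((j : Int) + 1)) = PySem.List.pyGet? diffs (-((j : Int) + 1) - 1) := by
          rw [e1, e2, ← r1, ← r2, List.getElem?_eq_getElem hj, List.getElem?_eq_getElem hj1, heq]
        rw [if_pos hget]
        have harg : (-((j : Int) + 1) - 1) = -(((j+1 : Nat) : Int) + 1) := by push_cast; ring
        rw [harg, ih (j+1) (count+1) (by omega)]
        have : lead (diffs.reverse.drop j) = lead (diffs.reverse.drop (j+1)) + 1 := by
          rw [hdrop, hdrop1, lead, if_pos heq, ← hdrop1]
        rw [this]; ring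
      · have hget : ¬ (PySem.List.pyGet? diffs (-((j : Int) + 1)) = PySem.List.pyGet? diffs (-((j : Int) + 1) - 1)) := by
          rw [e1, e2, ← r1, ← r2]
          intro h
          apply heq
          rw [List.getElem?_eq_getElem hj, List.getElem?_eq_getElem hj1] at h
          exact Option.some.inj h
        rw [if_neg hget]
        have : lead (diffs.reverse.drop j) = 1 := by
          rw [hdrop, hdrop1, lead, if_neg heq]
        rw [this]; ring
    · have hcond : ¬ (-1 * (-((j : Int) + 1)) < (diffs.length : Int)) := by omega
      rw [csLoopA, if_neg hcond]
      have : lead (diffs.reverse.drop j) = 1 := by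
        apply lead_short; simp [List.length_drop]; omega
      rw [this]; ring

theorem foldB_eq_lead (ds : List Int) : ∀ (p : Int),
    List.foldl csStep (1, p) ds = (lead ((p :: ds).reverse), ((p :: ds).reverse).headD 0) := by
  induction ds using List.reverseRecOn with
  | nil => intro p; simp [lead]
  | append_singleton l d ih =>
    intro p
    rw [List.foldl_append]
    rw [ih p]
    have hne : (p :: l).reverse ≠ [] := by simp
    obtain ⟨x, t, hxt⟩ := List.exists_cons_of_ne_nil hne
    have hrev : (p :: (l ++ [d])).reverse = d :: (p :: l).reverse := by simp
    rw [hrev, hxt]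
    simp only [List.foldl_cons, List.foldl_nil, csStep, List.headD]
    by_cases hdx : d = x
    · simp [hdx, lead]
    · simp [hdx, lead]

theorem lead_eq_one_of_short (diffs : List Int) (h : diffs.length ≤ 1) :
    lead diffs.reverse = 1 := by
  apply lead_short; simp [h]

-- ===== VERDICT (by name: the statement is the Claim_ definition above) =====
theorem completed_straight_steps_spec : Claim_equal_completed_straight_steps := by
  intro i_path _
  unfold Spec_completed_straight_steps
  simp only [completed_straight_steps, completed_straight_steps_alt]
  set n := i_path.length with hn
  set diffs := (PySem.List.pyRange 1 (n : Int) 1).map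
      (fun i => PySem.List.pyGetD i_path i 0 - PySem.List.pyGetD i_path (i - 1) 0) with hdiffs
  have hlen : diffs.length = ((n : Int) - 1).toNat := by
    simp [hdiffs, PySem.List.length_pyRange_one]
  have hA0 : csLoopA diffs 1 (-1) diffs.length = lead diffs.reverse := by
    have := csLoopA_eq_lead diffs diffs.length 0 1 (by omega)
    simpa using this
  by_cases h2 : (n : Int) = 2
  · rw [if_pos h2, if_pos (by omega)]
  · rw [if_neg h2]
    by_cases h3 : (n : Int) < 3
    · rw [if_pos h3, hA0]
      apply lead_eq_one_of_short
      omega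
    · rw [if_neg h3, hA0]
      -- n ≥ 3, so diffs = f 1 :: rest
      have h1n : (1 : Int) < (n : Int) := by omega
      have hr : PySem.List.pyRange 1 (n : Int) 1 = 1 :: PySem.List.pyRange 2 (n : Int) 1 := by
        have := PySem.List.pyRange_one_cons (a := 1) (b := (n : Int)) h1n
        simpa using this
      have hd : diffs = (PySem.List.pyGetD i_path 1 0 - PySem.List.pyGetD i_path 0 0) ::
          (PySem.List.pyRange 2 (n : Int) 1).map
            (fun i => PySem.List.pyGetD i_path i 0 - PySem.List.pyGetD i_path (i - 1) 0) := by
        rw [hdiffs, hr]; simp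
      set rest := (PySem.List.pyRange 2 (n : Int) 1).map
            (fun i => PySem.List.pyGetD i_path i 0 - PySem.List.pyGetD i_path (i - 1) 0) with hrest
      set d0 := PySem.List.pyGetD i_path 1 0 - PySem.List.pyGetD i_path 0 0 with hd0
      have hslice : PySem.List.slice diffs (some 1) none = rest := by
        rw [PySem.List.slice_from_one, hd]; simp
      have hhead : PySem.List.pyGetD diffs 0 0 = d0 := by
        rw [hd, PySem.List.pyGetD_zero_cons]
      rw [hslice, hhead, foldB_eq_lead rest d0, hd]
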